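-- pv_equiv track=rewrite | github.com/nargis22/PRODIGY_CS_03 | pass.py | password_complexity
-- ===== SOURCE A (Python) =====
-- def password_complexity(password):
--     # Define criteria for password complexity
--     criteria = {
--         'length': len(password) >= 8,
--         'uppercase': any(char.isupper() for char in password),
--         'lowercase': any(char.islower() for char in password),
--         'digit': any(char.isdigit() for char in password)
--     }
--
--     # Count the number of met criteria
--     complexity_score = sum(criteria.values())
--
--     return complexity_score
-- ===== SOURCE B (Python) =====
-- def password_complexity(password):
--     # Accumulate character-class bits (1=upper, 2=lower, 4=digit) in an int mask,
--     # stopping early once the mask saturates; score = bits of the mask + length criterion.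
--     mask = 0
--     for ch in password:
--         if ch.isupper():
--             mask |= 1
--         if ch.islower():
--             mask |= 2
--         if ch.isdigit():
--             mask |= 4
--         if mask == 7:
--             break
--     return (mask & 1) + ((mask >> 1) & 1) + ((mask >> 2) & 1) + (len(password) >= 8)
-- ===== Notes on version B (the rewrite author's own statement) =====
-- stated objective: alternative
-- what changed: Replaces A's dict of four independent any()-scans by a single bitmask accumulator loop (bits 1/2/4 for upper/lower/digit) that breaks early once the mask saturates at 7, the score being read off the mask's bits plus the length test.
import Mathlib
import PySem

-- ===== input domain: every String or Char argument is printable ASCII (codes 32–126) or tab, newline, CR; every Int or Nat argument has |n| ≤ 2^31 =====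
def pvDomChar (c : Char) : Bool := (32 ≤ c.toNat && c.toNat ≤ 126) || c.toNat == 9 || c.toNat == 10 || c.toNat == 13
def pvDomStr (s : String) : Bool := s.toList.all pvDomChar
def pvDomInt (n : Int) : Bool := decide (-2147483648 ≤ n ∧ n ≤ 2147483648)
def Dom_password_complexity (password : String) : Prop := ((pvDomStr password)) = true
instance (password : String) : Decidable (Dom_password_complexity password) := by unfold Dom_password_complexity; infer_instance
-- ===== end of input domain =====

-- B replaces A's dict of four any()-scans by one bitmask-accumulator loop with early exit; same asymptotic cost, different algorithmics.

-- ===== PORT A =====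
def password_complexity (password : String) : Int :=
  let criteria : PySem.Dict String Bool :=
    ((((PySem.Dict.empty).insert "length" (decide (PySem.Str.len password ≥ 8))).insert
        "uppercase" (password.toList.any PySem.Chars.isupper)).insert
        "lowercase" (password.toList.any PySem.Chars.islower)).insert
        "digit" (password.toList.any PySem.Chars.isdigit)
  criteria.values.foldl (fun s b => s + (if b then (1 : Int) else 0)) 0

-- ===== PORT B =====
def pcMaskLoop : List Char → Int → Int
  | [], m => m
  | c :: t, m =>
    let m1 := if PySem.Chars.isupper c then PySem.Int.bor m 1 else m
    let m2 := if PySem.Chars.islower c then PySem.Int.bor m1 2 else m1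
    let m3 := if PySem.Chars.isdigit c then PySem.Int.bor m2 4 else m2
    if m3 == 7 then m3 else pcMaskLoop t m3

def password_complexity_alt (password : String) : Int :=
  let mask := pcMaskLoop password.toList 0
  PySem.Int.band mask 1 + PySem.Int.band (mask >>> 1) 1 + PySem.Int.band (mask >>> 2) 1 +
    (if PySem.Str.len password ≥ 8 then (1 : Int) else 0)

-- ===== PRECONDITION & SPEC =====
def Spec_password_complexity (password : String) (out : Int) : Prop := out = password_complexity_alt password
instance (password : String) (out : Int) : Decidable (Spec_password_complexity password out) := by unfold Spec_password_complexity; infer_instance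

-- ===== CLAIM (what is proved, stated in full; the proofs are below) =====
def Claim_equal_password_complexity : Prop := ∀ (password : String), Dom_password_complexity password → Spec_password_complexity password (password_complexity password)

-- ===== LEMMAS AND PROOFS =====
-- the mask value carrying exactly the three class flags
def pcBits (a b c : Bool) : Int :=
  (if a then 1 else 0) + (if b then 2 else 0) + (if c then 4 else 0)

theorem pcBits_or1 (a b c : Bool) : PySem.Int.bor (pcBits a b c) 1 = pcBits true b c := by
  cases a <;> cases b <;> cases c <;> decide

theorem pcBits_or2 (a b c : Bool) : PySem.Int.bor (pcBits a b c) 2 = pcBits a true c := by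
  cases a <;> cases b <;> cases c <;> decide

theorem pcBits_or4 (a b c : Bool) : PySem.Int.bor (pcBits a b c) 4 = pcBits a b true := by
  cases a <;> cases b <;> cases c <;> decide

theorem pcBits_eq_seven (a b c : Bool) : (pcBits a b c == 7) = (a && b && c) := by
  cases a <;> cases b <;> cases c <;> decide

theorem pcMaskLoop_bits (l : List Char) (a b c : Bool) :
    pcMaskLoop l (pcBits a b c)
      = pcBits (a || l.any PySem.Chars.isupper) (b || l.any PySem.Chars.islower)
          (c || l.any PySem.Chars.isdigit) := by
  induction l generalizing a b c with
  | nil => simp [pcMaskLoop]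
  | cons ch t ih =>
    have h3 :
        (let m1 := if PySem.Chars.isupper ch then PySem.Int.bor (pcBits a b c) 1 else pcBits a b c
         let m2 := if PySem.Chars.islower ch then PySem.Int.bor m1 2 else m1
         if PySem.Chars.isdigit ch then PySem.Int.bor m2 4 else m2)
          = pcBits (a || PySem.Chars.isupper ch) (b || PySem.Chars.islower ch)
              (c || PySem.Chars.isdigit ch) := by
      cases hp : PySem.Chars.isupper ch <;> cases hq : PySem.Chars.islower ch <;>
        cases hr : PySem.Chars.isdigit ch <;>
        simp [pcBits_or1, pcBits_or2, pcBits_or4]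
    simp only [pcMaskLoop, h3, pcBits_eq_seven]
    by_cases hsat : ((a || PySem.Chars.isupper ch) && (b || PySem.Chars.islower ch) &&
        (c || PySem.Chars.isdigit ch)) = true
    · have ha := hsat; simp only [Bool.and_eq_true] at ha
      simp [List.any_cons, ← Bool.or_assoc, ha.1.1, ha.1.2, ha.2]
    · simp only [Bool.not_eq_true] at hsat
      simp [hsat, ih, List.any_cons, Bool.or_assoc]

-- ===== VERDICT (by name: the statement is the Claim_ definition above) =====
theorem password_complexity_spec : Claim_equal_password_complexity := by
  intro password _
  show password_complexity password = password_complexity_alt password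
  unfold password_complexity password_complexity_alt
  have h0 : (0 : Int) = pcBits false false false := by decide
  simp only [h0, pcMaskLoop_bits, Bool.false_or]
  simp only [PySem.Dict.insert, PySem.Dict.empty, PySem.Dict.values]
  cases password.toList.any PySem.Chars.isupper <;>
    cases password.toList.any PySem.Chars.islower <;>
    cases password.toList.any PySem.Chars.isdigit <;>
    simp [pcBits] <;> (try split_ifs) <;> decide
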